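-- pv_equiv track=rewrite | github.com/adit333/kattis-solutions | brute_force/good_morning.py | generate_all_possible_valid_nums
-- ===== SOURCE A (Python) =====
-- from typing import Set
--
-- number_grid = {'1': [0, 0], '2': [1, 0], '3': [2, 0],
--                '4': [0, 1], '5': [1, 1], '6': [2, 1],
--                '7': [0, 2], '8': [1, 2], '9': [2, 2],
--                             '0': [1, 3]
-- }
--
-- def generate_all_possible_valid_nums(max_k: int) -> Set:
--     valid_nums = set()
--
--     for num in range(1, max_k):
--         num = str(num)
--         valid = True
--         for i in range(1, len(num)):
--             if not(number_grid[num[i]][0] >= number_grid[num[i-1]][0] and   # the x-coord should be to the right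
--                    number_grid[num[i]][1] >= number_grid[num[i-1]][1]):     # the y-coord should be to the right
--                 valid = False
--                 break
--         if valid:
--             valid_nums.add(int(num))
--
--     return valid_nums
-- ===== SOURCE B (Python) =====
-- def generate_all_possible_valid_nums(max_k: int):
--     # BFS over keypad-monotone digit strings: extend each surviving number by
--     # every digit that keeps the keypad positions non-decreasing, level by level.
--     def coord(d):
--         return (1, 3) if d == 0 else ((d - 1) % 3, (d - 1) // 3)
--
--     def ok(a, b):
--         xa, ya = coord(a)
--         xb, yb = coord(b)
--         return xa <= xb and ya <= yb
--
--     out = []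
--     cur = list(range(1, 10))
--     while cur:
--         cur = [v for v in cur if v < max_k]
--         out.extend(cur)
--         cur = [10 * v + d for v in cur for d in range(10) if ok(v % 10, d)]
--     return set(out)
-- ===== Notes on version B (the rewrite author's own statement) =====
-- stated objective: faster
-- what changed: Instead of testing every number in range(1, max_k) by converting it to a string and scanning keypad coordinates, B does a level-by-level BFS that generates only the keypad-monotone numbers directly by appending admissible digits, so the work is proportional to the (tiny) number of valid numbers plus log(max_k) levels.
import Mathlib
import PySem

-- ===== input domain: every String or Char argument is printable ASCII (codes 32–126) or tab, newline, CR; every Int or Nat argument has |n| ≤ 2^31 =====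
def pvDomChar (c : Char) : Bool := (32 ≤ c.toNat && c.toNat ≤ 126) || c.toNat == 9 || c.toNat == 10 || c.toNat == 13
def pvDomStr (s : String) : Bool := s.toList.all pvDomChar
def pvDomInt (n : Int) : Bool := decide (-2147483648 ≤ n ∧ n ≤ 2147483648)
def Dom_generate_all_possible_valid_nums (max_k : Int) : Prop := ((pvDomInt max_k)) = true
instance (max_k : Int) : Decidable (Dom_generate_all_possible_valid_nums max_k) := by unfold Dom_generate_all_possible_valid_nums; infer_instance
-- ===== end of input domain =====

-- B replaces A's scan of every number in range(1, max_k) (string conversion + keypad-grid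
-- dict lookups per number) by a level-by-level BFS that generates exactly the keypad-monotone
-- numbers by appending admissible digits; measurably faster (output-sensitive).

-- ===== PORT A =====
def pvNumberGrid : PySem.Dict Char (List Int) :=
  PySem.Dict.mk [('1', [0, 0]), ('2', [1, 0]), ('3', [2, 0]),
                 ('4', [0, 1]), ('5', [1, 1]), ('6', [2, 1]),
                 ('7', [0, 2]), ('8', [1, 2]), ('9', [2, 2]),
                 ('0', [1, 3])]

-- the positive form of A's `if not(...)` condition (number_grid lookups; keys are the
-- digit characters, so the KeyError default [] is never reached on A's inputs)
def pvPairOk (a b : Char) : Bool :=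
  decide (PySem.List.pyGetD (pvNumberGrid.getD b []) 0 0 ≥ PySem.List.pyGetD (pvNumberGrid.getD a []) 0 0) &&
  decide (PySem.List.pyGetD (pvNumberGrid.getD b []) 1 0 ≥ PySem.List.pyGetD (pvNumberGrid.getD a []) 1 0)

-- A's inner `for i in range(1, len(num))` with its early `break`
def pvCheckA (cs : List Char) : List Int → Bool
  | [] => true
  | i :: rest =>
    if !(pvPairOk (PySem.List.pyGetD cs (i - 1) ' ') (PySem.List.pyGetD cs i ' ')) then false
    else pvCheckA cs rest

def generate_all_possible_valid_nums (max_k : Int) : List Int :=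
  (PySem.List.pyRange 1 max_k 1).foldl
    (fun valid_nums n =>
      let num : String := PySem.Int.toStr n          -- num = str(num)
      let valid := pvCheckA num.toList (PySem.List.pyRange 1 (PySem.Str.len num) 1)
      -- valid_nums.add(int(num)): int(num) re-parses str(n), which is n itself (n ≥ 1 here)
      if valid then PySem.Set.add valid_nums n else valid_nums)
    PySem.Set.empty

-- ===== PORT B =====
def pvCoordX (d : Nat) : Nat := if d = 0 then 1 else (d - 1) % 3
def pvCoordY (d : Nat) : Nat := if d = 0 then 3 else (d - 1) / 3

def pvOkB (a b : Nat) : Bool :=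
  decide (pvCoordX a ≤ pvCoordX b) && decide (pvCoordY a ≤ pvCoordY b)

-- [10 * v + d for d in range(10) if ok(v % 10, d)]
def pvChildren (v : Nat) : List Nat :=
  ((List.range 10).filter (fun d => pvOkB (v % 10) d)).map (fun d => 10 * v + d)

-- the `while cur:` loop; fuel 12 only totalizes it (for |max_k| ≤ 2^31 eleven levels
-- already end with an empty list, proved below)
def pvBfs (K : Nat) : Nat → List Nat → List Nat
  | 0, _ => []
  | fuel + 1, cur =>
    let sel := cur.filter (fun v => decide (v < K))
    if sel.isEmpty then [] else sel ++ pvBfs K fuel (sel.flatMap pvChildren)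

def generate_all_possible_valid_nums_alt (max_k : Int) : List Int :=
  let out := pvBfs max_k.toNat 12 ((List.range 9).map (· + 1))
  PySem.Set.ofList (out.map (fun v => Int.ofNat v))

-- ===== PRECONDITION & SPEC =====
def Spec_generate_all_possible_valid_nums (max_k : Int) (out : List Int) : Prop := out = generate_all_possible_valid_nums_alt max_k
instance (max_k : Int) (out : List Int) : Decidable (Spec_generate_all_possible_valid_nums max_k out) := by unfold Spec_generate_all_possible_valid_nums; infer_instance

-- ===== CLAIM (what is proved, stated in full; the proofs are below) =====
def Claim_equal_generate_all_possible_valid_nums : Prop := ∀ (max_k : Int), Dom_generate_all_possible_valid_nums max_k → Spec_generate_all_possible_valid_nums max_k (generate_all_possible_valid_nums max_k)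

-- ===== LEMMAS AND PROOFS =====

-- the common arithmetic validity predicate: digits of n, read left to right, sit at
-- non-decreasing keypad positions
def goodB (n : Nat) : Bool :=
  if n < 10 then true
  else pvOkB (n / 10 % 10) (n % 10) && goodB (n / 10)
termination_by n
decreasing_by omega

-- the sorted list of all valid numbers in [1, K): the reference both ports are reduced to
def pvTarget (K : Nat) : List Nat := ((List.range (K - 1)).map (· + 1)).filter goodB

-- ---------- generic fold/Set lemmas ----------
theorem pvFoldAdd (p : Int → Bool) : ∀ (xs acc : List Int), (acc ++ xs.filter p).Nodup →
    xs.foldl (fun s n => if p n then PySem.Set.add s n else s) acc = acc ++ xs.filter p := by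
  intro xs
  induction xs with
  | nil => intro acc _; simp
  | cons x t ih =>
    intro acc h
    by_cases hp : p x
    · rw [List.filter_cons_of_pos hp] at h
      have h' : ((acc ++ [x]) ++ t.filter p).Nodup := by
        rwa [List.append_cons] at h
      have hx : x ∉ acc := by
        rw [List.append_cons] at h
        have := (List.nodup_append.mp h).1
        intro hmem
        exact (List.disjoint_of_nodup_append this) hmem (by simp)
      have hadd : PySem.Set.add acc x = acc ++ [x] := PySem.Set.add_of_not_mem hx
      simp only [List.foldl_cons, hp, if_true, hadd]
      rw [ih (acc ++ [x]) h', List.filter_cons_of_pos hp, List.append_cons]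
      simp
    · rw [List.filter_cons_of_neg hp] at h
      simp only [List.foldl_cons]
      rw [if_neg (by simp [hp]), ih acc h, List.filter_cons_of_neg hp]

theorem pvOfListNodup (l : List Int) (h : l.Nodup) : PySem.Set.ofList l = l := by
  have := pvFoldAdd (fun _ => true) l [] (by simpa using h)
  simpa [PySem.Set.ofList_eq_foldl] using this

-- ---------- A-side: the string scan equals goodB ----------
def chainCheck : List Char → Bool
  | a :: b :: t => pvPairOk a b && chainCheck (b :: t)
  | _ => true

theorem chainCheck_short (l : List Char) (h : l.length ≤ 1) : chainCheck l = true := by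
  match l with
  | [] => rfl
  | [a] => rfl
  | a :: b :: t => simp at h

def pvLast (l : List Char) : Char := l.getLast?.getD ' '

theorem pvLast_cons_cons (a b : Char) (t : List Char) : pvLast (a :: b :: t) = pvLast (b :: t) := by
  simp [pvLast, List.getLast?_cons_cons]

theorem chainCheck_concat : ∀ (xs : List Char) (a c : Char),
    chainCheck ((a :: xs) ++ [c]) = (chainCheck (a :: xs) && pvPairOk (pvLast (a :: xs)) c) := by
  intro xs
  induction xs with
  | nil => intro a c; simp [chainCheck, pvLast, Bool.and_comm]
  | cons b t ih =>
    intro a c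
    have h1 : chainCheck ((a :: b :: t) ++ [c]) = (pvPairOk a b && chainCheck ((b :: t) ++ [c])) := by
      simp [chainCheck]
    rw [h1, ih b c]
    have h2 : chainCheck (a :: b :: t) = (pvPairOk a b && chainCheck (b :: t)) := by
      simp [chainCheck]
    rw [h2, Bool.and_assoc, pvLast_cons_cons]

theorem pvToDigits_last (m : Nat) : pvLast (Nat.toDigits 10 m) = Nat.digitChar (m % 10) := by
  rw [Nat.toDigits_eq_if (by norm_num)]
  by_cases h : m < 10
  · simp [h, pvLast, Nat.mod_eq_of_lt h]
  · simp [h, pvLast]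

theorem pvPairOk_digitChar (a b : Nat) (ha : a < 10) (hb : b < 10) :
    pvPairOk (Nat.digitChar a) (Nat.digitChar b) = pvOkB a b := by
  have H : ∀ a' ∈ List.range 10, ∀ b' ∈ List.range 10,
      pvPairOk (Nat.digitChar a') (Nat.digitChar b') = pvOkB a' b' := by decide
  exact H a (List.mem_range.mpr ha) b (List.mem_range.mpr hb)

theorem chainCheck_toDigits (m : Nat) : 1 ≤ m → chainCheck (Nat.toDigits 10 m) = goodB m := by
  induction m using Nat.strong_induction_on with
  | _ m ih =>
    intro hm
    by_cases h : m < 10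
    · rw [Nat.toDigits_of_lt_base h]
      rw [goodB]
      simp [chainCheck, h]
    · rw [Nat.toDigits_of_base_le (by norm_num) (Nat.le_of_not_lt h)]
      obtain ⟨a, t, heq⟩ : ∃ a t, Nat.toDigits 10 (m / 10) = a :: t := by
        cases hd : Nat.toDigits 10 (m / 10) with
        | nil => exact absurd hd (by have := @Nat.length_toDigits_pos 10 (m / 10); intro hh; rw [hh] at this; simp at this)
        | cons a t => exact ⟨a, t, rfl⟩
      rw [heq, chainCheck_concat, ← heq, pvToDigits_last]
      have hdiv1 : 1 ≤ m / 10 := by omega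
      have hdivlt : m / 10 < m := by omega
      rw [ih (m / 10) hdivlt hdiv1]
      rw [pvPairOk_digitChar _ _ (Nat.mod_lt _ (by norm_num)) (Nat.mod_lt _ (by norm_num))]
      conv_rhs => rw [goodB]
      simp [h, Bool.and_comm]

theorem pvCheckA_chain (cs : List Char) :
    ∀ (m k : Nat), cs.length ≤ k + m →
      pvCheckA cs (PySem.List.pyRange ((k : Int) + 1) (cs.length : Int) 1) = chainCheck (cs.drop k) := by
  intro m
  induction m with
  | zero =>
    intro k hk
    rw [PySem.List.pyRange_one_eq_nil (by exact_mod_cast by omega)]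
    rw [List.drop_eq_nil_of_le (by omega)]
    rfl
  | succ m ih =>
    intro k hk
    by_cases h : cs.length ≤ k + 1
    · rw [PySem.List.pyRange_one_eq_nil (by exact_mod_cast h)]
      rw [chainCheck_short _ (by rw [List.length_drop]; omega)]
      rfl
    · have hk1 : k + 1 < cs.length := by omega
      have hkl : k < cs.length := by omega
      rw [PySem.List.pyRange_one_cons (by exact_mod_cast hk1)]
      have e1 : ((k : Int) + 1) - 1 = (k : Int) := by ring
      have e2 : ((k : Int) + 1) = ((k + 1 : Nat) : Int) := by push_cast; ring
      rw [pvCheckA, e1, e2]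
      rw [PySem.List.pyGetD_natCast, PySem.List.pyGetD_natCast]
      rw [List.getD_eq_getElem (hn := hkl), List.getD_eq_getElem (hn := hk1)]
      rw [ih (k + 1) (by omega)]
      rw [List.drop_eq_getElem_cons hkl, List.drop_eq_getElem_cons hk1]
      cases hp : pvPairOk cs[k] cs[k + 1] <;> simp [chainCheck, hp]

theorem pvToChars_nonneg (n : Int) (h : 0 ≤ n) : PySem.Int.toChars n = Nat.toDigits 10 n.toNat := by
  rw [PySem.Int.toChars, if_neg (by omega)]

theorem pvValidEq (n : Int) (h1 : 1 ≤ n) :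
    pvCheckA (PySem.Int.toStr n).toList (PySem.List.pyRange 1 (PySem.Str.len (PySem.Int.toStr n)) 1) = goodB n.toNat := by
  have hcs : (PySem.Int.toStr n).toList = Nat.toDigits 10 n.toNat := by
    rw [PySem.Int.toList_toStr, pvToChars_nonneg n (by omega)]
  have hlen : PySem.Str.len (PySem.Int.toStr n) = ((PySem.Int.toStr n).toList.length : Int) := by
    simp [PySem.Str.len_eq]
  rw [hlen]
  have := pvCheckA_chain (PySem.Int.toStr n).toList (PySem.Int.toStr n).toList.length 0 (by omega)
  simp only [Nat.cast_zero, zero_add, List.drop_zero] at this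
  rw [this, hcs, chainCheck_toDigits _ (by omega)]

-- ---------- B-side: BFS characterization ----------
inductive pvAncD : Nat → Nat → Nat → Prop
  | refl (u : Nat) : pvAncD 0 u u
  | step (u d v n : Nat) : d < 10 → pvOkB (u % 10) d = true → pvAncD n (10 * u + d) v → pvAncD (n + 1) u v

theorem pvAnc_le {n u v : Nat} (h : pvAncD n u v) : u ≤ v := by
  induction h with
  | refl => exact le_refl _
  | step u d v n hd hok _ ih => omega

theorem pvAnc_snoc {n u w : Nat} (h : pvAncD n u w) :
    ∀ d, d < 10 → pvOkB (w % 10) d = true → pvAncD (n + 1) u (10 * w + d) := by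
  induction h with
  | refl u => intro d hd hok; exact pvAncD.step u d _ 0 hd hok (pvAncD.refl _)
  | step u d v n hd hok _ ih =>
    intro e he hoke
    exact pvAncD.step u d _ (n + 1) hd hok (ih e he hoke)

theorem pvGoodB_ext (u d : Nat) (hu : 1 ≤ u) (hd : d < 10) (hok : pvOkB (u % 10) d = true)
    (hg : goodB u = true) : goodB (10 * u + d) = true := by
  rw [goodB]
  have h10 : ¬ (10 * u + d < 10) := by omega
  have e1 : (10 * u + d) / 10 = u := by omega
  have e2 : (10 * u + d) % 10 = d := by omega
  simp [h10, e1, e2, hok, hg]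

theorem pvAnc_good {n u v : Nat} (h : pvAncD n u v) :
    1 ≤ u → goodB u = true → goodB v = true ∧ 1 ≤ v := by
  induction h with
  | refl u => exact fun hu hg => ⟨hg, hu⟩
  | step u d v n hd hok _ ih =>
    exact fun hu hg => ih (by omega) (pvGoodB_ext u d hu hd hok hg)

theorem pvMem_children {c u : Nat} :
    c ∈ pvChildren u ↔ ∃ d, d < 10 ∧ pvOkB (u % 10) d = true ∧ c = 10 * u + d := by
  simp only [pvChildren, List.mem_map, List.mem_filter, List.mem_range]
  constructor
  · rintro ⟨d, ⟨hd, hok⟩, rfl⟩; exact ⟨d, hd, hok, rfl⟩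
  · rintro ⟨d, hd, hok, rfl⟩; exact ⟨d, ⟨hd, hok⟩, rfl⟩

theorem pvBfs_succ (K fuel : Nat) (cur : List Nat) :
    pvBfs K (fuel + 1) cur =
      if (cur.filter (fun v => decide (v < K))).isEmpty then []
      else cur.filter (fun v => decide (v < K)) ++
        pvBfs K fuel ((cur.filter (fun v => decide (v < K))).flatMap pvChildren) := by
  rw [pvBfs]

theorem pvBfs_forward (K : Nat) : ∀ (fuel : Nat) (cur : List Nat) (v : Nat),
    v ∈ pvBfs K fuel cur → v < K ∧ ∃ u ∈ cur, ∃ n, pvAncD n u v := by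
  intro fuel
  induction fuel with
  | zero => intro cur v hv; simp [pvBfs] at hv
  | succ fuel ih =>
    intro cur v hv
    rw [pvBfs_succ] at hv
    by_cases hsel : (cur.filter (fun v => decide (v < K))).isEmpty
    · rw [if_pos hsel] at hv; simp at hv
    · rw [if_neg hsel, List.mem_append] at hv
      rcases hv with hv | hv
      · have := List.mem_filter.mp hv
        exact ⟨by simpa using this.2, v, this.1, 0, pvAncD.refl v⟩
      · obtain ⟨hvK, c, hc, n, hanc⟩ := ih _ v hv
        obtain ⟨u, hu, hcu⟩ := List.mem_flatMap.mp hc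
        obtain ⟨d, hd, hok, rfl⟩ := pvMem_children.mp hcu
        exact ⟨hvK, u, (List.mem_filter.mp hu).1, n + 1, pvAncD.step u d _ n hd hok hanc⟩

theorem pvBfs_backward (K : Nat) : ∀ {n u v : Nat}, pvAncD n u v →
    ∀ (fuel : Nat) (cur : List Nat), u ∈ cur → v < K → n < fuel → v ∈ pvBfs K fuel cur := by
  intro n u v h
  induction h with
  | refl u =>
    intro fuel cur hu hvK hn
    obtain ⟨f, rfl⟩ : ∃ f, fuel = f + 1 := ⟨fuel - 1, by omega⟩
    rw [pvBfs_succ]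
    have husel : u ∈ cur.filter (fun v => decide (v < K)) := List.mem_filter.mpr ⟨hu, by simpa using hvK⟩
    have hne : ¬ (cur.filter (fun v => decide (v < K))).isEmpty := by
      rw [List.isEmpty_iff]
      intro he; rw [he] at husel; simp at husel
    rw [if_neg hne, List.mem_append]
    exact Or.inl husel
  | step u d v n hd hok hanc ih =>
    intro fuel cur hu hvK hn
    obtain ⟨f, rfl⟩ : ∃ f, fuel = f + 1 := ⟨fuel - 1, by omega⟩
    rw [pvBfs_succ]
    have huK : u < K := by
      have h1 : 10 * u + d ≤ v := pvAnc_le hanc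
      omega
    have husel : u ∈ cur.filter (fun v => decide (v < K)) := List.mem_filter.mpr ⟨hu, by simpa using huK⟩
    have hne : ¬ (cur.filter (fun v => decide (v < K))).isEmpty := by
      rw [List.isEmpty_iff]
      intro he; rw [he] at husel; simp at husel
    rw [if_neg hne, List.mem_append]
    refine Or.inr (ih f _ ?_ hvK (by omega))
    exact List.mem_flatMap.mpr ⟨u, husel, pvMem_children.mpr ⟨d, hd, hok, rfl⟩⟩

theorem pvGood_anc : ∀ v : Nat, 1 ≤ v → goodB v = true →
    ∃ n u, 1 ≤ u ∧ u < 10 ∧ pvAncD n u v ∧ 10 ^ n ≤ v := by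
  intro v
  induction v using Nat.strong_induction_on with
  | _ v ih =>
    intro hv hg
    by_cases h : v < 10
    · exact ⟨0, v, hv, h, pvAncD.refl v, by simpa⟩
    · rw [goodB] at hg
      simp only [h, if_false, Bool.and_eq_true] at hg
      obtain ⟨n, u, hu1, hu10, hanc, hpow⟩ := ih (v / 10) (by omega) (by omega) hg.2
      refine ⟨n + 1, u, hu1, hu10, ?_, ?_⟩
      · have := pvAnc_snoc hanc (v % 10) (by omega) hg.1
        have e : 10 * (v / 10) + v % 10 = v := by omega
        rwa [e] at this
      · have : 10 ^ (n + 1) = 10 * 10 ^ n := by ring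
        omega
  -- note: 10 ^ (n+1) ≤ v from 10 ^ n ≤ v / 10

theorem pvChildren_pairwise (u : Nat) : (pvChildren u).Pairwise (· < ·) := by
  rw [pvChildren, List.pairwise_map]
  exact ((List.pairwise_lt_range).filter _).imp (fun {a b} h => by omega)

theorem pvFlat_pairwise : ∀ (sel : List Nat), sel.Pairwise (· < ·) →
    (sel.flatMap pvChildren).Pairwise (· < ·) := by
  intro sel
  induction sel with
  | nil => intro _; simp
  | cons u t ih =>
    intro h
    rw [List.flatMap_cons]
    rw [List.pairwise_append]
    refine ⟨pvChildren_pairwise u, ih h.of_cons, ?_⟩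
    intro a ha b hb
    obtain ⟨d, hd, _, rfl⟩ := pvMem_children.mp ha
    obtain ⟨w, hw, hbw⟩ := List.mem_flatMap.mp hb
    obtain ⟨e, he, _, rfl⟩ := pvMem_children.mp hbw
    have huw : u < w := (List.pairwise_cons.mp h).1 w hw
    omega

theorem pvBfs_pairwise (K : Nat) : ∀ (fuel : Nat) (cur : List Nat) (lo : Nat), 1 ≤ lo →
    (∀ v ∈ cur, lo ≤ v ∧ v < 10 * lo) → cur.Pairwise (· < ·) →
    (pvBfs K fuel cur).Pairwise (· < ·) := by
  intro fuel
  induction fuel with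
  | zero => intro cur lo _ _ _; simp [pvBfs]
  | succ fuel ih =>
    intro cur lo hlo hbound hpw
    rw [pvBfs_succ]
    by_cases hsel : (cur.filter (fun v => decide (v < K))).isEmpty
    · rw [if_pos hsel]; simp
    · rw [if_neg hsel, List.pairwise_append]
      have hselpw : (cur.filter (fun v => decide (v < K))).Pairwise (· < ·) := hpw.filter _
      have hselbound : ∀ v ∈ cur.filter (fun v => decide (v < K)), lo ≤ v ∧ v < 10 * lo :=
        fun v hv => hbound v (List.mem_filter.mp hv).1
      refine ⟨hselpw, ?_, ?_⟩
      · apply ih _ (10 * lo) (by omega) ?_ (pvFlat_pairwise _ hselpw)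
        intro c hc
        obtain ⟨u, hu, hcu⟩ := List.mem_flatMap.mp hc
        obtain ⟨d, hd, _, rfl⟩ := pvMem_children.mp hcu
        have := hselbound u hu
        omega
      · intro a ha b hb
        obtain ⟨_, c, hc, n, hanc⟩ := pvBfs_forward K _ _ b hb
        obtain ⟨u, hu, hcu⟩ := List.mem_flatMap.mp hc
        obtain ⟨d, hd, _, rfl⟩ := pvMem_children.mp hcu
        have hcb : 10 * u + d ≤ b := pvAnc_le hanc
        have h1 := hselbound u hu
        have h2 := hselbound a ha
        omega

theorem pvSorted_mem_eq : ∀ (l1 l2 : List Nat), l1.Pairwise (· < ·) → l2.Pairwise (· < ·) →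
    (∀ x, x ∈ l1 ↔ x ∈ l2) → l1 = l2 := by
  intro l1 l2 h1 h2 hmem
  have hn1 : l1.Nodup := h1.imp (fun h => Nat.ne_of_lt h)
  have hn2 : l2.Nodup := h2.imp (fun h => Nat.ne_of_lt h)
  have hperm : l1.Perm l2 := (List.perm_ext_iff_of_nodup hn1 hn2).mpr hmem
  exact List.Perm.eq_of_pairwise (fun a b _ _ hab hba => by omega) h1 h2 hperm

theorem pvTarget_pairwise (K : Nat) : (pvTarget K).Pairwise (· < ·) := by
  apply List.Pairwise.filter
  rw [List.pairwise_map]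
  exact (List.pairwise_lt_range).imp (fun {a b} h => by omega)

theorem pvTarget_mem (K : Nat) (v : Nat) :
    v ∈ pvTarget K ↔ (1 ≤ v ∧ v < K ∧ goodB v = true) := by
  simp only [pvTarget, List.mem_filter, List.mem_map, List.mem_range]
  constructor
  · rintro ⟨⟨k, hk, rfl⟩, hg⟩; exact ⟨by omega, by omega, hg⟩
  · rintro ⟨h1, h2, hg⟩; exact ⟨⟨v - 1, by omega, by omega⟩, hg⟩

theorem pvSeed_mem (u : Nat) : u ∈ (List.range 9).map (· + 1) ↔ 1 ≤ u ∧ u < 10 := by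
  simp only [List.mem_map, List.mem_range]
  constructor
  · rintro ⟨k, hk, rfl⟩; omega
  · rintro ⟨h1, h2⟩; exact ⟨u - 1, by omega, by omega⟩

theorem pvBfs_eq_target (K : Nat) (hK : K ≤ 2147483648) :
    pvBfs K 12 ((List.range 9).map (· + 1)) = pvTarget K := by
  apply pvSorted_mem_eq
  · apply pvBfs_pairwise K 12 _ 1 (le_refl 1)
    · intro v hv
      have := (pvSeed_mem v).mp hv
      omega
    · rw [List.pairwise_map]
      exact (List.pairwise_lt_range).imp (fun {a b} h => by omega)
  · exact pvTarget_pairwise K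
  · intro v
    rw [pvTarget_mem]
    constructor
    · intro hv
      obtain ⟨hvK, u, hu, n, hanc⟩ := pvBfs_forward K _ _ v hv
      have hu' := (pvSeed_mem u).mp hu
      have hgu : goodB u = true := by rw [goodB]; simp [hu'.2]
      obtain ⟨hgv, hv1⟩ := pvAnc_good hanc hu'.1 hgu
      exact ⟨hv1, hvK, hgv⟩
    · rintro ⟨hv1, hvK, hgv⟩
      obtain ⟨n, u, hu1, hu10, hanc, hpow⟩ := pvGood_anc v hv1 hgv
      have hn : n < 12 := by
        by_contra hge
        have h10 : (10 : Nat) ^ 10 ≤ 10 ^ n := Nat.pow_le_pow_right (by norm_num) (by omega)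
        have : (10 : Nat) ^ 10 = 10000000000 := by norm_num
        omega
      exact pvBfs_backward K hanc 12 _ ((pvSeed_mem u).mpr ⟨hu1, hu10⟩) hvK hn

-- ---------- assembling the two sides ----------
theorem pvB_eq (max_k : Int) (h : Dom_generate_all_possible_valid_nums max_k) :
    generate_all_possible_valid_nums_alt max_k = (pvTarget max_k.toNat).map (fun v => Int.ofNat v) := by
  have hdom : max_k ≤ 2147483648 := by
    unfold Dom_generate_all_possible_valid_nums pvDomInt at h
    simp at h; omega
  have hK : max_k.toNat ≤ 2147483648 := by omega
  unfold generate_all_possible_valid_nums_alt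
  rw [pvBfs_eq_target max_k.toNat hK]
  apply pvOfListNodup
  apply List.Nodup.map
  · intro a b hab; exact Int.ofNat.inj hab
  · exact (pvTarget_pairwise _).imp (fun h => Nat.ne_of_lt h)

theorem pvA_eq (max_k : Int) :
    generate_all_possible_valid_nums max_k = (pvTarget max_k.toNat).map (fun v => Int.ofNat v) := by
  unfold generate_all_possible_valid_nums
  have hfold := pvFoldAdd
      (fun n => pvCheckA (PySem.Int.toStr n).toList (PySem.List.pyRange 1 (PySem.Str.len (PySem.Int.toStr n)) 1))
      (PySem.List.pyRange 1 max_k 1) []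
      (by simpa using (PySem.List.nodup_pyRange_one 1 max_k).filter _)
  simp only [List.nil_append] at hfold
  rw [show PySem.Set.empty = ([] : List Int) from rfl]
  rw [hfold]
  -- both sides as a map over a filtered range
  rw [PySem.List.pyRange_one]
  have hlen : (max_k - 1).toNat = max_k.toNat - 1 := by omega
  rw [List.filter_map, hlen]
  unfold pvTarget
  rw [List.filter_map, List.map_map]
  have hfilter : (List.range (max_k.toNat - 1)).filter
        ((fun n => pvCheckA (PySem.Int.toStr n).toList (PySem.List.pyRange 1 (PySem.Str.len (PySem.Int.toStr n)) 1)) ∘ (fun k : Nat => (1 : Int) + (k : Int)))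
      = (List.range (max_k.toNat - 1)).filter (goodB ∘ (· + 1)) := by
    apply List.filter_congr
    intro k _
    simp only [Function.comp_apply]
    rw [pvValidEq ((1 : Int) + k) (by omega)]
    congr 1
    omega
  rw [hfilter]
  apply List.map_congr_left
  intro k _
  simp only [Function.comp_apply, Int.ofNat_eq_natCast]
  omega

-- ===== VERDICT (by name: the statement is the Claim_ definition above) =====
theorem generate_all_possible_valid_nums_spec : Claim_equal_generate_all_possible_valid_nums := by
  intro max_k hdom
  unfold Spec_generate_all_possible_valid_nums
  rw [pvA_eq max_k, pvB_eq max_k hdom]
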